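-- pv_equiv track=rewrite | github.com/PanStephan/NIR | owasp_ml/build_token_datasets.py | _choose_entity_type
-- ===== SOURCE A (Python) =====
-- from typing import Iterable
--
-- def _choose_entity_type(values: Iterable[str | None]) -> str | None:
--     normalized = []
--     for v in values:
--         if v is None:
--             continue
--         text = str(v).strip().lower()
--         if not text:
--             continue
--         normalized.append(text)
--     if not normalized:
--         return None
--     if "token" in normalized:
--         return "token"
--     if "contract" in normalized:
--         return "contract"
--     if "wallet" in normalized:
--         return "wallet"
--     return normalized[0]
-- ===== SOURCE B (Python) =====
-- def _choose_entity_type(values):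
--     # Running argmin over a priority rank: token=0 < contract=1 < wallet=2 < other=3.
--     # Strict '<' keeps the FIRST value attaining the minimal rank, so the rank-3
--     # fallback is the first surviving normalized value, as required.
--     priority = {"token": 0, "contract": 1, "wallet": 2}
--     best = None
--     best_rank = 4
--     for v in values:
--         if v is None:
--             continue
--         t = str(v).strip().lower()
--         if not t:
--             continue
--         r = priority.get(t, 3)
--         if r < best_rank:
--             best, best_rank = t, r
--     return best
-- ===== Notes on version B (the rewrite author's own statement) =====
-- stated objective: alternative
-- what changed: Replaces the build-a-list-then-three-membership-scans with a single running argmin over a priority rank (token=0, contract=1, wallet=2, other=3); the strict comparison keeps the first value of minimal rank, so no membership tests and no post-loop priority cascade exist.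
import Mathlib
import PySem

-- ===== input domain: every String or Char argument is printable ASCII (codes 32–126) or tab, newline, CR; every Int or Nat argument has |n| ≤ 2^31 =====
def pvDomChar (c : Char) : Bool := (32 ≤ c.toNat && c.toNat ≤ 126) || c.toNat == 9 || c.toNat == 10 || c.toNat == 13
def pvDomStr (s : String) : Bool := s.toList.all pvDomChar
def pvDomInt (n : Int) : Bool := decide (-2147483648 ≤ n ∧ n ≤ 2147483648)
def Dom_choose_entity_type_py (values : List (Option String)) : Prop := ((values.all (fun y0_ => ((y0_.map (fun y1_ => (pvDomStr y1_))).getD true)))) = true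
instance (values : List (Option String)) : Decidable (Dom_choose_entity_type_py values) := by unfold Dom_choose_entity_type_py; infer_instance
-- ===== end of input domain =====

-- B replaces A's build-a-list-then-three-membership-scans with a single running
-- argmin over a priority rank (token<contract<wallet<other), keeping the first
-- value of minimal rank (objective: alternative, same asymptotic cost, O(1) space).


-- ===== PORT A =====
-- str(v).strip().lower()
def pvNorm (s : String) : String := PySem.Str.lower (PySem.Str.strip s)

-- the loop building `normalized` (skip None and empty-after-normalization, append otherwise)
def pvNormList : List (Option String) → List String
  | [] => []
  | none :: rest => pvNormList rest
  | some s :: rest =>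
      let t := pvNorm s
      if t = "" then pvNormList rest else t :: pvNormList rest

def choose_entity_type_py (values : List (Option String)) : Option String :=
  let normalized := pvNormList values
  if normalized = [] then none
  else if normalized.contains "token" then some "token"
  else if normalized.contains "contract" then some "contract"
  else if normalized.contains "wallet" then some "wallet"
  else PySem.List.pyGet? normalized 0   -- normalized[0]

-- ===== PORT B =====
-- priority.get(t, 3) with priority = {"token": 0, "contract": 1, "wallet": 2}
def pvRank (t : String) : Nat :=
  PySem.Dict.getD (PySem.Dict.ofList [("token", 0), ("contract", 1), ("wallet", 2)]) t 3

-- B's single pass: running argmin (best, best_rank), strict '<' keeps the first minimum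
def pvAltLoop : List (Option String) → Option String → Nat → Option String
  | [], best, _ => best
  | none :: rest, best, bestRank => pvAltLoop rest best bestRank
  | some s :: rest, best, bestRank =>
      let t := pvNorm s
      if t = "" then pvAltLoop rest best bestRank
      else
        let r := pvRank t
        if r < bestRank then pvAltLoop rest (some t) r
        else pvAltLoop rest best bestRank

def choose_entity_type_py_alt (values : List (Option String)) : Option String :=
  pvAltLoop values none 4

-- ===== PRECONDITION & SPEC =====
def Spec_choose_entity_type_py (values : List (Option String)) (out : Option String) : Prop := out = choose_entity_type_py_alt values
instance (values : List (Option String)) (out : Option String) : Decidable (Spec_choose_entity_type_py values out) := by unfold Spec_choose_entity_type_py; infer_instance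

-- ===== CLAIM (what is proved, stated in full; the proofs are below) =====
def Claim_equal_choose_entity_type_py : Prop := ∀ (values : List (Option String)), Dom_choose_entity_type_py values → Spec_choose_entity_type_py values (choose_entity_type_py values)

-- ===== LEMMAS AND PROOFS =====

theorem pvRank_eq (t : String) :
    pvRank t = if t = "token" then 0 else if t = "contract" then 1
               else if t = "wallet" then 2 else 3 := by
  by_cases h1 : t = "token"
  · subst h1; decide
  by_cases h2 : t = "contract"
  · subst h2; decide
  by_cases h3 : t = "wallet"
  · subst h3; decide
  have b1 : ("token" == t) = false := beq_eq_false_iff_ne.mpr (Ne.symm h1)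
  have b2 : ("contract" == t) = false := beq_eq_false_iff_ne.mpr (Ne.symm h2)
  have b3 : ("wallet" == t) = false := beq_eq_false_iff_ne.mpr (Ne.symm h3)
  simp [pvRank, PySem.Dict.ofList, PySem.Dict.update, PySem.Dict.insert, PySem.Dict.empty,
    PySem.Dict.get?, PySem.Dict.getD, PySem.Dict.contains, List.find?, b1, b2, b3, h1, h2, h3]

-- from rank 0 the argmin can never improve
theorem pvAltLoop_zero (l : List (Option String)) (b : Option String) :
    pvAltLoop l b 0 = b := by
  induction l with
  | nil => simp [pvAltLoop]
  | cons v rest ih =>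
    cases v with
    | none => simpa [pvAltLoop] using ih
    | some s => simp [pvAltLoop, ih]

-- from state (contract, 1): only a later "token" can win
theorem pvAltLoop_one (l : List (Option String)) :
    pvAltLoop l (some "contract") 1 =
      if (pvNormList l).contains "token" then some "token" else some "contract" := by
  induction l with
  | nil => simp [pvAltLoop, pvNormList]
  | cons v rest ih =>
    cases v with
    | none => simpa [pvAltLoop, pvNormList] using ih
    | some s =>
      by_cases h : pvNorm s = ""
      · simpa [pvAltLoop, pvNormList, h] using ih
      · by_cases ht : pvNorm s = "token"
        · simp [pvAltLoop, pvNormList, h, ht, pvRank_eq, pvAltLoop_zero]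
        · have : ¬ pvRank (pvNorm s) < 1 := by simp [pvRank_eq, ht]; split_ifs <;> simp
          simp [pvAltLoop, pvNormList, h, Ne.symm ht, this, ih]

-- from state (wallet, 2)
theorem pvAltLoop_two (l : List (Option String)) :
    pvAltLoop l (some "wallet") 2 =
      if (pvNormList l).contains "token" then some "token"
      else if (pvNormList l).contains "contract" then some "contract"
      else some "wallet" := by
  induction l with
  | nil => simp [pvAltLoop, pvNormList]
  | cons v rest ih =>
    cases v with
    | none => simpa [pvAltLoop, pvNormList] using ih
    | some s =>
      by_cases h : pvNorm s = ""
      · simpa [pvAltLoop, pvNormList, h] using ih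
      · by_cases ht : pvNorm s = "token"
        · simp [pvAltLoop, pvNormList, h, ht, pvRank_eq, pvAltLoop_zero]
        · by_cases hc : pvNorm s = "contract"
          · simp [pvAltLoop, pvNormList, h, ht, hc, pvRank_eq, pvAltLoop_one]
          · have : ¬ pvRank (pvNorm s) < 2 := by simp [pvRank_eq, ht, hc]; split_ifs <;> simp
            simp [pvAltLoop, pvNormList, h, Ne.symm ht, Ne.symm hc, this, ih]

-- from state (f, 3): exactly A's priority cascade with fallback f
theorem pvAltLoop_three (l : List (Option String)) (f : String) :
    pvAltLoop l (some f) 3 =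
      if (pvNormList l).contains "token" then some "token"
      else if (pvNormList l).contains "contract" then some "contract"
      else if (pvNormList l).contains "wallet" then some "wallet"
      else some f := by
  induction l with
  | nil => simp [pvAltLoop, pvNormList]
  | cons v rest ih =>
    cases v with
    | none => simpa [pvAltLoop, pvNormList] using ih
    | some s =>
      by_cases h : pvNorm s = ""
      · simpa [pvAltLoop, pvNormList, h] using ih
      · by_cases ht : pvNorm s = "token"
        · simp [pvAltLoop, pvNormList, h, ht, pvRank_eq, pvAltLoop_zero]
        · by_cases hc : pvNorm s = "contract"
          · simp [pvAltLoop, pvNormList, h, ht, hc, pvRank_eq, pvAltLoop_one]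
          · by_cases hw : pvNorm s = "wallet"
            · simp [pvAltLoop, pvNormList, h, ht, hc, hw, pvRank_eq, pvAltLoop_two]
            · have : ¬ pvRank (pvNorm s) < 3 := by simp [pvRank_eq, ht, hc, hw]
              simp [pvAltLoop, pvNormList, h, Ne.symm ht, Ne.symm hc, Ne.symm hw, this, ih]

-- initial state (None, 4): B computes A's selection over pvNormList
theorem pvAltLoop_start (l : List (Option String)) :
    pvAltLoop l none 4 =
      match pvNormList l with
      | [] => none
      | f :: rest =>
        if (f :: rest).contains "token" then some "token"
        else if (f :: rest).contains "contract" then some "contract"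
        else if (f :: rest).contains "wallet" then some "wallet"
        else some f := by
  induction l with
  | nil => simp [pvAltLoop, pvNormList]
  | cons v rest ih =>
    cases v with
    | none => simpa [pvAltLoop, pvNormList] using ih
    | some s =>
      by_cases h : pvNorm s = ""
      · simpa [pvAltLoop, pvNormList, h] using ih
      · by_cases ht : pvNorm s = "token"
        · simp [pvAltLoop, pvNormList, h, ht, pvRank_eq, pvAltLoop_zero]
        · by_cases hc : pvNorm s = "contract"
          · simp [pvAltLoop, pvNormList, h, ht, hc, pvRank_eq, pvAltLoop_one]
          · by_cases hw : pvNorm s = "wallet"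
            · simp [pvAltLoop, pvNormList, h, ht, hc, hw, pvRank_eq, pvAltLoop_two]
            · have h4 : pvRank (pvNorm s) < 4 := by simp [pvRank_eq, ht, hc, hw]
              have h3 : pvRank (pvNorm s) = 3 := by simp [pvRank_eq, ht, hc, hw]
              simp [pvAltLoop, pvNormList, h, Ne.symm ht, Ne.symm hc, Ne.symm hw, h4, h3, pvAltLoop_three]

-- ===== VERDICT (by name: the statement is the Claim_ definition above) =====
theorem choose_entity_type_py_spec : Claim_equal_choose_entity_type_py := by
  intro values _
  unfold Spec_choose_entity_type_py choose_entity_type_py choose_entity_type_py_alt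
  rw [pvAltLoop_start]
  cases h : pvNormList values with
  | nil => simp
  | cons a t => simp [PySem.List.pyGet?, PySem.List.pyIdx?]
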